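-- pv_equiv track=rewrite | github.com/ussoio/usso-python | src/usso/utils/validators.py | _contains_bad_word
-- ===== SOURCE A (Python) =====
-- import string
-- from collections.abc import Iterable
--
-- def _alnum_only(s_lower_ascii: str) -> str:
--     """Remove separators; keep only a-z and 0-9."""
--     return "".join(
--         ch
--         for ch in s_lower_ascii
--         if ch in string.ascii_letters + string.digits
--     )
--
-- def _contains_bad_word(
--     s_lower_ascii: str, bad_words: Iterable[str]
-- ) -> tuple[bool, str]:
--     """
--     Check for bad words.
--
--     Checks substring after removing separators
--     (blocks 'b.a.d' evasion).
--     """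
--     compact = _alnum_only(s_lower_ascii)
--     for word in bad_words:
--         if not word:  # defensive
--             continue
--         if word in compact:
--             return True, word
--     return False, ""
-- ===== SOURCE B (Python) =====
-- import string
--
-- _ALNUM = set(string.ascii_letters + string.digits)
--
--
-- def _contains_bad_word(s_lower_ascii, bad_words):
--     """One scan over the compacted text builds a hash set of every substring
--     whose length is a bad-word length; each word is then a set lookup."""
--     compact = "".join(ch for ch in s_lower_ascii if ch in _ALNUM)
--     words = [w for w in bad_words if w]
--     lengths = {len(w) for w in words}
--     present = set()
--     for j in range(len(compact)):
--         for L in lengths: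
--             present.add(compact[j:j + L])
--     for w in words:
--         if w in present:
--             return True, w
--     return False, ""
-- ===== Notes on version B (the rewrite author's own statement) =====
-- stated objective: alternative
-- what changed: B inverts the traversal: one scan over the compacted text builds a hash set of every substring whose length is some bad-word length, then each word becomes a single set lookup and the first word of bad_words found present is returned, instead of A's word-by-word substring search with early return.
import Mathlib
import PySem

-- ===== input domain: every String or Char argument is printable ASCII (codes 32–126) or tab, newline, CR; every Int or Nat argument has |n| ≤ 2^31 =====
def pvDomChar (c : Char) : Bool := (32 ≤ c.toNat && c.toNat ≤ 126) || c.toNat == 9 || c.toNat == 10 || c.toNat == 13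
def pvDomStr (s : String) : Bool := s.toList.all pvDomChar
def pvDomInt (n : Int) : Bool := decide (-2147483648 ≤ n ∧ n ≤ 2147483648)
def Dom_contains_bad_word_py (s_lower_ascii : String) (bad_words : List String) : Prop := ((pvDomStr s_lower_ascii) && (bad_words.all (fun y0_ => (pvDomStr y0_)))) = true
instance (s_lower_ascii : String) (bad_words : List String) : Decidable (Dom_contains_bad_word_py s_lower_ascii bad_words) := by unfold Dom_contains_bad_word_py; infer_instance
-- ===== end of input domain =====

-- B replaces A's word-by-word substring search (early return) by one scan over the
-- compacted text building a hash set of all substrings of the bad-word lengths, then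
-- returns the first word of bad_words present in that set; same return value.

-- ===== PORT A =====
-- string.ascii_letters + string.digits
def pvAlnumStr : String :=
  "abcdefghijklmnopqrstuvwxyzABCDEFGHIJKLMNOPQRSTUVWXYZ0123456789"

-- _alnum_only: "".join(ch for ch in s if ch in string.ascii_letters + string.digits)
def pvAlnumOnly (s : String) : List Char :=
  s.toList.filter (fun ch => PySem.Chars.isIn [ch] pvAlnumStr.toList)

-- the 'for word in bad_words' loop with its early return
def pvGoA (compact : List Char) : List String → Bool × String
  | [] => (false, "")
  | w :: ws =>
    if w.toList = [] then pvGoA compact ws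
    else if PySem.Chars.isIn w.toList compact then (true, w)
    else pvGoA compact ws

def contains_bad_word_py (s_lower_ascii : String) (bad_words : List String) : Bool × String :=
  pvGoA (pvAlnumOnly s_lower_ascii) bad_words

-- ===== PORT B =====
-- _ALNUM = set(string.ascii_letters + string.digits)
def pvAlnumSet : PySem.Set Char := PySem.Set.ofList pvAlnumStr.toList

def pvCompactB (s : String) : List Char :=
  s.toList.filter (fun ch => PySem.Set.contains pvAlnumSet ch)

-- lengths = {len(w) for w in words}
def pvLengths (words : List String) : PySem.Set Int :=
  PySem.Set.ofList (words.map (fun w => (w.toList.length : Int)))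

-- for j in range(len(compact)): for L in lengths: present.add(compact[j:j+L])
def pvPresent (compact : List Char) (lengths : PySem.Set Int) : PySem.Set (List Char) :=
  (PySem.List.pyRange 0 (compact.length : Int) 1).foldl
    (fun p j => lengths.foldl
      (fun p L => PySem.Set.add p (PySem.List.slice compact (some j) (some (j + L)))) p)
    PySem.Set.empty

-- for w in words: if w in present: return True, w / return False, ""
def pvPick (present : PySem.Set (List Char)) : List String → Bool × String
  | [] => (false, "")
  | w :: ws => if PySem.Set.contains present w.toList then (true, w) else pvPick present ws

def contains_bad_word_py_alt (s_lower_ascii : String) (bad_words : List String) : Bool × String :=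
  let compact := pvCompactB s_lower_ascii
  let words := bad_words.filter (fun w => !w.toList.isEmpty)
  pvPick (pvPresent compact (pvLengths words)) words

-- ===== PRECONDITION & SPEC =====
def Spec_contains_bad_word_py (s_lower_ascii : String) (bad_words : List String) (out : Bool × String) : Prop := out = contains_bad_word_py_alt s_lower_ascii bad_words
instance (s_lower_ascii : String) (bad_words : List String) (out : Bool × String) : Decidable (Spec_contains_bad_word_py s_lower_ascii bad_words out) := by unfold Spec_contains_bad_word_py; infer_instance

-- ===== CLAIM (what is proved, stated in full; the proofs are below) =====
def Claim_equal_contains_bad_word_py : Prop := ∀ (s_lower_ascii : String) (bad_words : List String), Dom_contains_bad_word_py s_lower_ascii bad_words → Spec_contains_bad_word_py s_lower_ascii bad_words (contains_bad_word_py s_lower_ascii bad_words)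

-- ===== LEMMAS AND PROOFS =====

-- [a] is an infix of l exactly when a is a member
theorem pv_singleton_infix {α : Type} (a : α) (l : List α) : [a] <:+: l ↔ a ∈ l := by
  constructor
  · intro h; exact h.sublist.subset (List.mem_singleton_self a)
  · intro h
    obtain ⟨s, t, rfl⟩ := List.append_of_mem h
    exact ⟨s, t, by simp⟩

-- the two separator filters agree character by character
theorem pvCompact_eq (s : String) : pvCompactB s = pvAlnumOnly s := by
  unfold pvCompactB pvAlnumOnly
  apply List.filter_congr
  intro ch _
  have h1 : PySem.Set.contains pvAlnumSet ch = true ↔ ch ∈ pvAlnumStr.toList := by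
    rw [PySem.Set.contains_iff]
    exact PySem.Set.mem_ofList pvAlnumStr.toList ch
  have h2 : PySem.Chars.isIn [ch] pvAlnumStr.toList = true ↔ ch ∈ pvAlnumStr.toList := by
    rw [PySem.Chars.isIn_iff_infix, pv_singleton_infix]
  rw [Bool.eq_iff_iff]
  exact h1.trans h2.symm

-- membership after a fold that adds g L for every L of a list
theorem pv_inner_mem {α β : Type} [BEq β] [LawfulBEq β] (g : α → β) (x : β) :
    ∀ (ls : List α) (p : PySem.Set β),
      (x ∈ ls.foldl (fun p L => PySem.Set.add p (g L)) p)
      ↔ x ∈ p ∨ ∃ L ∈ ls, x = g L := by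
  intro ls
  induction ls with
  | nil => intro p; simp
  | cons y ys ih =>
    intro p
    simp only [List.foldl_cons, ih, PySem.Set.mem_add]
    constructor
    · rintro ((h | rfl) | ⟨L, hL, rfl⟩)
      · exact Or.inl h
      · exact Or.inr ⟨y, List.mem_cons_self, rfl⟩
      · exact Or.inr ⟨L, List.mem_cons_of_mem _ hL, rfl⟩
    · rintro (h | ⟨L, hL, rfl⟩)
      · exact Or.inl (Or.inl h)
      rcases List.mem_cons.mp hL with rfl | hL
      · exact Or.inl (Or.inr rfl)
      · exact Or.inr ⟨L, hL, rfl⟩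

-- membership after the outer range loop, for any upper bound n
theorem pv_outer_mem (compact : List Char) (lengths : PySem.Set Int) (x : List Char) :
    ∀ n : Nat,
      (x ∈ (PySem.List.pyRange 0 (n : Int) 1).foldl
        (fun p j => lengths.foldl
          (fun p L => PySem.Set.add p (PySem.List.slice compact (some j) (some (j + L)))) p)
        PySem.Set.empty)
      ↔ ∃ j : Nat, j < n ∧ ∃ L ∈ lengths,
          x = PySem.List.slice compact (some (j : Int)) (some ((j : Int) + L)) := by
  intro n
  induction n with
  | zero =>
    rw [PySem.List.pyRange_one_eq_nil (by norm_num)]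
    simp [PySem.Set.empty]
  | succ n ih =>
    have hsplit : PySem.List.pyRange 0 ((n + 1 : Nat) : Int) 1
        = PySem.List.pyRange 0 (n : Int) 1 ++ [(n : Int)] := by
      have := PySem.List.pyRange_one_succ_right (a := 0) (b := (n : Int)) (by positivity)
      rw [← this]; norm_num
    rw [hsplit, List.foldl_append]
    simp only [List.foldl_cons, List.foldl_nil]
    rw [pv_inner_mem, ih]
    constructor
    · rintro (⟨j, hj, hL⟩ | ⟨L, hL, rfl⟩)
      · exact ⟨j, Nat.lt_succ_of_lt hj, hL⟩
      · exact ⟨n, Nat.lt_succ_self n, L, hL, rfl⟩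
    · rintro ⟨j, hj, L, hL, rfl⟩
      rcases Nat.lt_succ_iff_lt_or_eq.mp hj with hj | rfl
      · exact Or.inl ⟨j, hj, L, hL, rfl⟩
      · exact Or.inr ⟨L, hL, rfl⟩

-- present contains a nonempty word of an indexed length iff it occurs in compact
theorem pvPresent_contains (compact : List Char) (lengths : PySem.Set Int) (w : String)
    (hw : w.toList ≠ []) (hnn : ∀ L ∈ lengths, 0 ≤ L)
    (hlen : ((w.toList.length : Int)) ∈ lengths) :
    PySem.Set.contains (pvPresent compact lengths) w.toList = true ↔
      PySem.Chars.isIn w.toList compact = true := by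
  rw [PySem.Set.contains_iff]
  unfold pvPresent
  rw [pv_outer_mem]
  constructor
  · rintro ⟨j, _, L, hL, hx⟩
    have h0L := hnn L hL
    rw [PySem.List.slice_toNat _ (by positivity) (by positivity)] at hx
    have : w.toList <+: compact.drop (((j : Int)).toNat) := by
      rw [hx]
      exact List.take_prefix _ _
    exact (PySem.Chars.exists_prefix_drop_iff_isIn _ _).mp ⟨_, this⟩
  · intro hin
    obtain ⟨j, hp⟩ := (PySem.Chars.exists_prefix_drop_iff_isIn _ _).mpr hin
    have hj : j < compact.length := by
      by_contra hj
      have : compact.drop j = [] := List.drop_eq_nil_of_le (by omega)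
      rw [this, List.prefix_nil] at hp
      exact hw hp
    refine ⟨j, hj, (w.toList.length : Int), hlen, ?_⟩
    rw [PySem.List.slice_toNat _ (by positivity) (by positivity)]
    have : ((j : Int) + (w.toList.length : Int)).toNat - ((j : Int)).toNat
        = w.toList.length := by omega
    rw [this, Int.toNat_natCast]
    exact List.prefix_iff_eq_take.mp hp

-- every indexed length is nonnegative
theorem pvLengths_nonneg (words : List String) : ∀ L ∈ pvLengths words, 0 ≤ L := by
  intro L hL
  rw [pvLengths] at hL
  have := (PySem.Set.mem_ofList _ _).mp hL
  obtain ⟨w, _, rfl⟩ := List.mem_map.mp this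
  positivity

-- the length of a listed word is indexed
theorem pvLengths_mem (words : List String) (w : String) (hw : w ∈ words) :
    ((w.toList.length : Int)) ∈ pvLengths words := by
  rw [pvLengths]
  exact (PySem.Set.mem_ofList _ _).mpr (List.mem_map.mpr ⟨w, hw, rfl⟩)

-- B's final pick over the filtered words equals A's search loop
theorem pvPick_eq (compact : List Char) (present : PySem.Set (List Char)) :
    ∀ l : List String,
      (∀ w ∈ l, w.toList ≠ [] →
        (PySem.Set.contains present w.toList = true ↔ PySem.Chars.isIn w.toList compact = true)) →
      pvPick present (l.filter (fun w => !w.toList.isEmpty)) = pvGoA compact l := by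
  intro l
  induction l with
  | nil => intro _; rfl
  | cons w ws ih =>
    intro h
    by_cases hw : w.toList = []
    · rw [List.filter_cons_of_neg (by simp [hw])]
      rw [pvGoA, if_pos hw]
      exact ih (fun x hx => h x (List.mem_cons_of_mem _ hx))
    · rw [List.filter_cons_of_pos (by simp [hw])]
      rw [pvGoA, if_neg hw, pvPick]
      have hiff := h w List.mem_cons_self hw
      by_cases hin : PySem.Chars.isIn w.toList compact = true
      · rw [if_pos (hiff.mpr hin), if_pos hin]
      · rw [if_neg (fun hc => hin (hiff.mp hc)), if_neg hin]
        exact ih (fun x hx => h x (List.mem_cons_of_mem _ hx))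

-- ===== VERDICT (by name: the statement is the Claim_ definition above) =====
theorem contains_bad_word_py_spec : Claim_equal_contains_bad_word_py := by
  intro s bad _
  unfold Spec_contains_bad_word_py contains_bad_word_py contains_bad_word_py_alt
  rw [pvCompact_eq]
  symm
  apply pvPick_eq
  intro w hw hwe
  have hmem : w ∈ bad.filter (fun w => !w.toList.isEmpty) := by
    rw [List.mem_filter]
    exact ⟨hw, by simp [hwe]⟩
  exact pvPresent_contains _ _ _ hwe (pvLengths_nonneg _) (pvLengths_mem _ _ hmem)
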